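-- pv_equiv track=rewrite | github.com/yashasweeK9/CodeChef-Solutions | python/HAPPYSTR.py | stat
-- ===== SOURCE A (Python) =====
-- def stat(str):
--     maxCount = 0
--     count = 0
--     for i in str:
--         if(i in "aeiou"):
--             count+=1
--         else:
--             if(count>maxCount):
--                 maxCount = count
--             count=0
--     if(count>maxCount):
--         maxCount = count
--     return "Happy" if(maxCount>2) else "Sad"
-- ===== SOURCE B (Python) =====
-- def stat(str):
--     # Sliding window of width 3: "Happy" iff some three consecutive chars are all vowels.
--     return "Happy" if any(
--         str[i] in "aeiou" and str[i + 1] in "aeiou" and str[i + 2] in "aeiou"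
--         for i in range(len(str) - 2)
--     ) else "Sad"
-- ===== Notes on version B (the rewrite author's own statement) =====
-- stated objective: simpler
-- what changed: Replaces the stateful running-max vowel-run counter with a stateless width-3 sliding window: the string is Happy iff some three consecutive characters are all vowels.
import Mathlib
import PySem

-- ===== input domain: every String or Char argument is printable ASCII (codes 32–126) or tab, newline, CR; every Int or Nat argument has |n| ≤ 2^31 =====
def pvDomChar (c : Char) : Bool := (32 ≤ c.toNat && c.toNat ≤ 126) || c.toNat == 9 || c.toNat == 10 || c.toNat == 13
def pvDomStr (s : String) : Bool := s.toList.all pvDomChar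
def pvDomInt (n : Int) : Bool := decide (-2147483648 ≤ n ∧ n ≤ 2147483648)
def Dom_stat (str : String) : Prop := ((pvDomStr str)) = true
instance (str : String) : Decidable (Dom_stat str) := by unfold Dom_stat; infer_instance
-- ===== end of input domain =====

-- B replaces A's running-max vowel-run counter by a stateless width-3 sliding window (simpler, same O(n) cost).


-- ===== PORT A =====
-- `i in "aeiou"` in both ports:
def isVow (c : Char) : Bool := "aeiou".toList.contains c

-- the for-loop of A, carrying (maxCount, count); returns maxCount after the final `if count>maxCount` check
def statLoop : List Char → Int → Int → Int
  | [], maxCount, count => if count > maxCount then count else maxCount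
  | i :: t, maxCount, count =>
      if isVow i then statLoop t maxCount (count + 1)
      else statLoop t (if count > maxCount then count else maxCount) 0

def stat (str : String) : String :=
  if statLoop str.toList 0 0 > 2 then "Happy" else "Sad"

-- ===== PORT B =====
-- B's `any(str[i] in V and str[i+1] in V and str[i+2] in V for i in range(len(str)-2))`:
-- the sliding window over the character list
def hasTriple : List Char → Bool
  | a :: b :: c :: t => (isVow a && isVow b && isVow c) || hasTriple (b :: c :: t)
  | _ => false

def stat_alt (str : String) : String :=
  if hasTriple str.toList then "Happy" else "Sad"

-- ===== PRECONDITION & SPEC =====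
def Spec_stat (str : String) (out : String) : Prop := out = stat_alt str
instance (str : String) (out : String) : Decidable (Spec_stat str out) := by unfold Spec_stat; infer_instance

-- ===== CLAIM (what is proved, stated in full; the proofs are below) =====
def Claim_equal_stat : Prop := ∀ (str : String), Dom_stat str → Spec_stat str (stat str)

-- ===== LEMMAS AND PROOFS =====

-- length of the leading vowel run
def lead : List Char → Int
  | [] => 0
  | x :: t => if isVow x then 1 + lead t else 0

theorem lead_nonneg (cs : List Char) : 0 ≤ lead cs := by
  induction cs with
  | nil => simp [lead]
  | cons x t ih => simp only [lead]; split <;> omega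

theorem lead_ge3_hasTriple (cs : List Char) (h : lead cs ≥ 3) : hasTriple cs = true := by
  match cs with
  | [] => simp [lead] at h
  | [a] =>
      by_cases ha : isVow a = true <;> simp [lead, ha] at h
  | [a, b] =>
      by_cases ha : isVow a = true <;> by_cases hb : isVow b = true <;>
        simp [lead, ha, hb] at h
  | a :: b :: c :: t =>
      simp only [hasTriple, Bool.or_eq_true, Bool.and_eq_true]
      by_cases ha : isVow a = true
      · by_cases hb : isVow b = true
        · by_cases hc : isVow c = true
          · exact Or.inl ⟨⟨ha, hb⟩, hc⟩
          · simp [lead, ha, hb, hc] at h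
        · simp [lead, ha, hb] at h
      · simp [lead, ha] at h

theorem hasTriple_cons (x : Char) (t : List Char) :
    hasTriple (x :: t) = true ↔ (isVow x = true ∧ lead t ≥ 2) ∨ hasTriple t = true := by
  match t with
  | [] => simp [hasTriple, lead]
  | [b] =>
      by_cases hb : isVow b = true <;> simp [hasTriple, lead, hb]
  | b :: c :: t' =>
      simp only [hasTriple, Bool.or_eq_true, Bool.and_eq_true]
      constructor
      · rintro (⟨⟨hx, hb⟩, hc⟩ | h)
        · have := lead_nonneg t'
          refine Or.inl ⟨hx, ?_⟩
          simp [lead, hb, hc]; omega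
        · exact Or.inr h
      · rintro (⟨hx, h⟩ | h)
        · by_cases hb : isVow b = true
          · by_cases hc : isVow c = true
            · exact Or.inl ⟨⟨hx, hb⟩, hc⟩
            · simp [lead, hb, hc] at h
          · simp [lead, hb] at h
        · exact Or.inr h

theorem statLoop_char (cs : List Char) : ∀ m c : Int, 0 ≤ c →
    (statLoop cs m c > 2 ↔ m > 2 ∨ c + lead cs > 2 ∨ hasTriple cs = true) := by
  induction cs with
  | nil =>
      intro m c _
      simp only [statLoop, lead, hasTriple]
      split <;> simp <;> omega
  | cons x t ih =>
      intro m c hc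
      have hlt := lead_nonneg t
      simp only [statLoop, lead]
      by_cases hx : isVow x = true
      · rw [if_pos hx, if_pos hx, ih _ _ (by omega), hasTriple_cons]
        constructor
        · rintro (h | h | h)
          · exact Or.inl h
          · exact Or.inr (Or.inl (by omega))
          · exact Or.inr (Or.inr (Or.inr h))
        · rintro (h | h | (⟨_, hl⟩ | h))
          · exact Or.inl h
          · exact Or.inr (Or.inl (by omega))
          · exact Or.inr (Or.inl (by omega))
          · exact Or.inr (Or.inr h)
      · rw [if_neg hx, if_neg hx, ih _ _ le_rfl, hasTriple_cons]
        constructor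
        · rintro (h | h | h)
          · split at h <;> [exact Or.inr (Or.inl (by omega)); exact Or.inl h]
          · by_cases h3 : lead t ≥ 3
            · exact Or.inr (Or.inr (Or.inr (lead_ge3_hasTriple t h3)))
            · omega
          · exact Or.inr (Or.inr (Or.inr h))
        · rintro (h | h | (⟨hv, _⟩ | h))
          · exact Or.inl (by split <;> omega)
          · exact Or.inl (by split <;> omega)
          · exact absurd hv hx
          · exact Or.inr (Or.inr h)

-- ===== VERDICT (by name: the statement is the Claim_ definition above) =====
theorem stat_spec : Claim_equal_stat := by
  intro str _
  unfold Spec_stat stat stat_alt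
  have h := statLoop_char str.toList 0 0 le_rfl
  by_cases ht : hasTriple str.toList = true
  · rw [if_pos ht, if_pos (h.mpr (Or.inr (Or.inr ht)))]
  · simp only [Bool.not_eq_true] at ht
    rw [ht, if_neg (Bool.false_ne_true), if_neg]
    intro hgt
    rcases h.mp hgt with h1 | h1 | h1
    · omega
    · have h2 := lead_ge3_hasTriple str.toList (by omega)
      rw [ht] at h2; exact Bool.false_ne_true h2
    · rw [ht] at h1; exact Bool.false_ne_true h1
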